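-- pv_equiv track=rewrite | github.com/AnthonyLovesCoffee/miniPythonProjects | sortingAlg/quickSort.py | colourArray
-- ===== SOURCE A (Python) =====
-- def colourArray(dataLen, head, tail, border, currentindx, isSwapping=False):
--     colourArray = []
--     for i in range(dataLen):
--         if i >= head and i <= tail:
--             colourArray.append("grey")
--         else:
--             colourArray.append("white")
--
--         if i == tail:
--             colourArray[i] = 'blue'
--         elif i == border:
--             colourArray[i] = 'red'
--         elif i == currentindx:
--             colourArray[i] = 'yellow'
--
--         if isSwapping:
--             if i == border or i == currentindx:
--                 colourArray[i] = 'green'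
--
--     return colourArray
-- ===== SOURCE B (Python) =====
-- def colourArray(dataLen, head, tail, border, currentindx, isSwapping=False):
--     n = max(dataLen, 0)
--     # base: closed-form segment concatenation, grey block is [lo, hi)
--     lo = min(max(head, 0), n)
--     hi = min(max(tail + 1, lo), n)
--     arr = ['white'] * lo + ['grey'] * (hi - lo) + ['white'] * (n - hi)
--     # overrides dict: later insertions overwrite, so each index maps to its winning colour
--     overrides = {currentindx: 'yellow', border: 'red', tail: 'blue'}
--     if isSwapping:
--         overrides[border] = 'green'
--         overrides[currentindx] = 'green'
--     for idx, col in overrides.items():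
--         if 0 <= idx < n:
--             arr[idx] = col
--     return arr
-- ===== Notes on version B (the rewrite author's own statement) =====
-- stated objective: alternative
-- what changed: Replaces A's per-index loop with its elif chain by a closed-form construction: the grey/white base is built as a concatenation of three repeated segments from clamped bounds (no per-index test), and the highlight precedence is materialised once as an overrides dict (later insertions overwrite) applied in a single bounds-guarded pass over its items.
import Mathlib
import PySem

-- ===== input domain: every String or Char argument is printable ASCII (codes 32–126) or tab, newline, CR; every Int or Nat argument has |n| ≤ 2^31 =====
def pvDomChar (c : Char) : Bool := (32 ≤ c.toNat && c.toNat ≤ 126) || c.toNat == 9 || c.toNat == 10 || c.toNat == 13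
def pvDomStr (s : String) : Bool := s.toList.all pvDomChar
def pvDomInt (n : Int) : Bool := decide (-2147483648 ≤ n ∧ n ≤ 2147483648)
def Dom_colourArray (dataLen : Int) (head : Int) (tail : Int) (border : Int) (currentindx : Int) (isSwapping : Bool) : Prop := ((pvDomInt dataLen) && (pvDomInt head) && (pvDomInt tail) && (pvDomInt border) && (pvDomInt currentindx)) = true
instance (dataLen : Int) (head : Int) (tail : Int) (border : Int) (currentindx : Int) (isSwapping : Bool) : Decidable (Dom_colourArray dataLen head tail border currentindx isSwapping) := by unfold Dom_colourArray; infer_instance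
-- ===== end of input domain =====

-- B builds the grey/white base as three repeated segments from clamped bounds and applies an
-- overrides dict (priority by overwriting) in one guarded pass (objective: alternative).

-- ===== PORT A =====
-- one iteration of A's for-loop body: append the base colour, then the elif chain, then the swap override
def colourArrayStep (head : Int) (tail : Int) (border : Int) (currentindx : Int)
    (isSwapping : Bool) (arr : List String) (i : Int) : List String :=
  let arr := arr ++ [if i ≥ head ∧ i ≤ tail then "grey" else "white"]
  let arr :=
    if i = tail then arr.set i.toNat "blue"
    else if i = border then arr.set i.toNat "red"
    else if i = currentindx then arr.set i.toNat "yellow"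
    else arr
  if isSwapping then
    (if i = border ∨ i = currentindx then arr.set i.toNat "green" else arr)
  else arr

def colourArray (dataLen : Int) (head : Int) (tail : Int) (border : Int) (currentindx : Int) (isSwapping : Bool) : List String :=
  (PySem.List.pyRange 0 dataLen 1).foldl (colourArrayStep head tail border currentindx isSwapping) []

-- ===== PORT B =====
def colourArray_alt (dataLen : Int) (head : Int) (tail : Int) (border : Int) (currentindx : Int) (isSwapping : Bool) : List String :=
  let n : Int := max dataLen 0
  let lo : Int := min (max head 0) n
  let hi : Int := min (max (tail + 1) lo) n
  let arr := List.replicate lo.toNat "white" ++ List.replicate (hi - lo).toNat "grey"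
               ++ List.replicate (n - hi).toNat "white"
  let ov : PySem.Dict Int String :=
    ((PySem.Dict.empty.insert currentindx "yellow").insert border "red").insert tail "blue"
  let ov := if isSwapping then (ov.insert border "green").insert currentindx "green" else ov
  ov.items.foldl
    (fun a p => if 0 ≤ p.1 ∧ p.1 < n then a.set p.1.toNat p.2 else a) arr

-- ===== PRECONDITION & SPEC =====
def Spec_colourArray (dataLen : Int) (head : Int) (tail : Int) (border : Int) (currentindx : Int) (isSwapping : Bool) (out : List String) : Prop := out = colourArray_alt dataLen head tail border currentindx isSwapping
instance (dataLen : Int) (head : Int) (tail : Int) (border : Int) (currentindx : Int) (isSwapping : Bool) (out : List String) : Decidable (Spec_colourArray dataLen head tail border currentindx isSwapping out) := by unfold Spec_colourArray; infer_instance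

-- ===== CLAIM (what is proved, stated in full; the proofs are below) =====
def Claim_equal_colourArray : Prop := ∀ (dataLen : Int) (head : Int) (tail : Int) (border : Int) (currentindx : Int) (isSwapping : Bool), Dom_colourArray dataLen head tail border currentindx isSwapping → Spec_colourArray dataLen head tail border currentindx isSwapping (colourArray dataLen head tail border currentindx isSwapping)

-- ===== LEMMAS AND PROOFS =====

-- the final colour of cell i, as one per-index function
def pvColour (head tail border currentindx : Int) (isSwapping : Bool) (i : Int) : String :=
  let base := if head ≤ i ∧ i ≤ tail then "grey" else "white"
  let x := if i = tail then "blue" else if i = border then "red"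
           else if i = currentindx then "yellow" else base
  if isSwapping ∧ (i = border ∨ i = currentindx) then "green" else x

def pvBase (head tail : Int) (i : Int) : String :=
  if head ≤ i ∧ i ≤ tail then "grey" else "white"

theorem set_append_length (l : List String) (x y : String) :
    (l ++ [x]).set l.length y = l ++ [y] := by
  induction l with
  | nil => rfl
  | cons a t ih => simp [ih]

theorem step_eq (head tail border currentindx : Int) (s : Bool) (arr : List String) (i : Int)
    (hlen : arr.length = i.toNat) :
    colourArrayStep head tail border currentindx s arr i
      = arr ++ [pvColour head tail border currentindx s i] := by
  have hset : ∀ x y : String, (arr ++ [x]).set i.toNat y = arr ++ [y] := by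
    intro x y; rw [← hlen]; exact set_append_length arr x y
  cases s <;>
    (unfold colourArrayStep pvColour
     split_ifs <;> simp_all)

theorem foldl_loop (dataLen head tail border currentindx : Int) (s : Bool) :
    ∀ (n : Nat) (j : Int) (acc : List String), 0 ≤ j → (dataLen - j).toNat = n →
    acc.length = j.toNat →
    (PySem.List.pyRange j dataLen 1).foldl (colourArrayStep head tail border currentindx s) acc
      = acc ++ (PySem.List.pyRange j dataLen 1).map (pvColour head tail border currentindx s) := by
  intro n
  induction n with
  | zero =>
    intro j acc hj hn _
    have hle : dataLen ≤ j := by omega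
    rw [PySem.List.pyRange_one_eq_nil hle]; simp
  | succ n ih =>
    intro j acc hj hn hlen
    have hlt : j < dataLen := by omega
    rw [PySem.List.pyRange_one_cons hlt]
    simp only [List.foldl_cons, List.map_cons]
    rw [step_eq head tail border currentindx s acc j hlen]
    rw [ih (j + 1) (acc ++ [pvColour head tail border currentindx s j]) (by omega) (by omega)
        (by simp [hlen]; omega)]
    simp

-- a three-segment replicate concatenation is the pointwise map over the range
theorem seg_eq (dataLen lo hi : Int) (g : Int → String)
    (h0 : 0 ≤ lo) (h1 : lo ≤ hi) (h2 : hi ≤ max dataLen 0)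
    (hg : ∀ i : Int, 0 ≤ i → i < dataLen →
      g i = if lo ≤ i ∧ i < hi then "grey" else "white") :
    List.replicate lo.toNat "white" ++ List.replicate (hi - lo).toNat "grey"
        ++ List.replicate ((max dataLen 0) - hi).toNat "white"
      = (PySem.List.pyRange 0 dataLen 1).map g := by
  apply List.ext_getElem
  · simp [PySem.List.length_pyRange_one]; omega
  · intro k hk1 hk2
    have hk : k < (dataLen - 0).toNat := by
      simpa [PySem.List.length_pyRange_one] using hk2
    simp only [List.getElem_map, PySem.List.getElem_pyRange_one]
    rw [hg (0 + k) (by omega) (by omega)]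
    by_cases hkhi : k < hi.toNat
    · rw [List.getElem_append_left (by simp; omega)]
      by_cases hklo : k < lo.toNat
      · rw [List.getElem_append_left (by simp; omega)]
        rw [List.getElem_replicate, if_neg (by omega)]
      · rw [List.getElem_append_right (by simp; omega)]
        rw [List.getElem_replicate, if_pos (by constructor <;> simp <;> omega)]
    · rw [List.getElem_append_right (by simp; omega)]
      rw [List.getElem_replicate, if_neg (by omega)]

-- a single guarded assignment on a mapped range is a pointwise override
theorem setIf_map (dataLen idx : Int) (col : String) (g : Int → String) :
    (if 0 ≤ idx ∧ idx < max dataLen 0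
       then ((PySem.List.pyRange 0 dataLen 1).map g).set idx.toNat col
       else (PySem.List.pyRange 0 dataLen 1).map g)
      = (PySem.List.pyRange 0 dataLen 1).map (fun i => if i = idx then col else g i) := by
  split_ifs with hin
  · apply List.ext_getElem
    · simp
    · intro k h1 h2
      rw [List.getElem_set]
      simp only [List.getElem_map, PySem.List.getElem_pyRange_one]
      have hk : k < (dataLen - 0).toNat := by simpa [PySem.List.length_pyRange_one] using h2
      split_ifs with e1 e2 e2 <;> first | rfl | omega
  · symm
    apply List.map_congr_left
    intro i hi
    rw [PySem.List.mem_pyRange_one] at hi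
    have : i ≠ idx := by omega
    simp [this]

-- folding the guarded assignments of a nodup-key association list = pointwise first-match lookup
theorem fold_items (dataLen : Int) (l : List (Int × String)) (g : Int → String)
    (hnd : (l.map Prod.fst).Nodup) :
    l.foldl (fun a p => if 0 ≤ p.1 ∧ p.1 < max dataLen 0 then a.set p.1.toNat p.2 else a)
        ((PySem.List.pyRange 0 dataLen 1).map g)
      = (PySem.List.pyRange 0 dataLen 1).map (fun i => (l.lookup i).getD (g i)) := by
  induction l generalizing g with
  | nil => simp
  | cons p rest ih =>
    obtain ⟨k, v⟩ := p
    simp only [List.map_cons, List.nodup_cons] at hnd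
    simp only [List.foldl_cons]
    rw [setIf_map dataLen k v g]
    rw [ih _ hnd.2]
    apply List.map_congr_left
    intro i _
    by_cases hik : i = k
    · subst hik
      have hnone : rest.lookup i = none := by
        rw [List.lookup_eq_none_iff]
        intro a ha
        simp only [bne_iff_ne, ne_eq]
        intro hia
        exact hnd.1 (List.mem_map.mpr ⟨a, ha, hia.symm⟩)
      simp [hnone]
    · have hbeq : (i == k) = false := by simp [hik]
      rw [List.lookup_cons, hbeq, if_neg hik]

-- first-match lookup on a dict's items is the dict's get?
theorem lookup_items (d : PySem.Dict Int String) (i : Int) :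
    d.items.lookup i = d.get? i := by
  obtain ⟨l⟩ := d
  induction l with
  | nil => rfl
  | cons p rest ih =>
    obtain ⟨k, v⟩ := p
    rw [PySem.Dict.get?_mk_cons]
    by_cases hik : i = k
    · subst hik; simp
    · have h1 : (i == k) = false := beq_eq_false_iff_ne.mpr hik
      have h2 : (k == i) = false := beq_eq_false_iff_ne.mpr (Ne.symm hik)
      simpa [List.lookup_cons, h1, h2] using ih

-- the overrides dict read back over the base is exactly A's per-index colour
theorem dict_colour (head tail border currentindx : Int) (s : Bool) (i : Int) :
    ((if s then
        (((((PySem.Dict.empty.insert currentindx "yellow").insert border "red").insert tail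
            "blue").insert border "green").insert currentindx "green")
      else
        ((PySem.Dict.empty.insert currentindx "yellow").insert border "red").insert tail
          "blue").get? i).getD (pvBase head tail i)
      = pvColour head tail border currentindx s i := by
  cases s <;>
    simp only [if_true, if_false, Bool.false_eq_true, PySem.Dict.get?_insert,
      PySem.Dict.get?_empty, pvColour, pvBase] <;>
    · split_ifs <;> simp_all

-- keys of the overrides dict are nodup
theorem ov_nodup (border currentindx tail : Int) (s : Bool) :
    (((if s then
        (((((PySem.Dict.empty.insert currentindx "yellow").insert border "red").insert tail
            "blue").insert border "green").insert currentindx "green")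
      else
        ((PySem.Dict.empty.insert currentindx "yellow").insert border "red").insert tail
          "blue")).items.map Prod.fst).Nodup := by
  cases s <;>
    · show (PySem.Dict.keys _).Nodup
      simp only [if_true, if_false, Bool.false_eq_true]
      apply PySem.Dict.nodup_keys_insert
      apply PySem.Dict.nodup_keys_insert
      apply PySem.Dict.nodup_keys_insert
      try apply PySem.Dict.nodup_keys_insert
      try apply PySem.Dict.nodup_keys_insert
      exact PySem.Dict.nodup_keys_empty

theorem alt_eq_map (dataLen head tail border currentindx : Int) (s : Bool) :
    colourArray_alt dataLen head tail border currentindx s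
      = (PySem.List.pyRange 0 dataLen 1).map (pvColour head tail border currentindx s) := by
  simp only [colourArray_alt]
  rw [seg_eq dataLen (min (max head 0) (max dataLen 0))
      (min (max (tail + 1) (min (max head 0) (max dataLen 0))) (max dataLen 0))
      (pvBase head tail) (by omega) (by omega) (by omega)
      (by
        intro i hi0 hi1
        simp only [pvBase]
        split_ifs <;> first | rfl | (exfalso; omega))]
  rw [fold_items dataLen _ _ (ov_nodup border currentindx tail s)]
  apply List.map_congr_left
  intro i _
  rw [lookup_items]
  exact dict_colour head tail border currentindx s i

-- ===== VERDICT (by name: the statement is the Claim_ definition above) =====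
theorem colourArray_spec : Claim_equal_colourArray := by
  intro dataLen head tail border currentindx s _
  unfold Spec_colourArray colourArray
  rw [alt_eq_map]
  rw [foldl_loop dataLen head tail border currentindx s (dataLen - 0).toNat 0 [] le_rfl rfl rfl]
  simp
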